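-- pv_equiv track=rewrite | github.com/tothedarktowercame/futon6 | src/futon6/latex_terms.py | enrichment_stats
-- ===== SOURCE A (Python) =====
-- def enrichment_stats(enriched: list[dict]) -> dict:
--     """Summarize what enrichment found."""
--     total_implicit_rels = sum(len(e.get("implicit_relations", []))
--                              for e in enriched)
--     total_new_terms = sum(len(e.get("new_terms", [])) for e in enriched)
--     total_xrefs = sum(len(e.get("extracted_xrefs", [])) for e in enriched)
--     total_envs = sum(len(e.get("extracted_envs", [])) for e in enriched)
--     entries_with_implicit = sum(1 for e in enriched
--                                 if e.get("implicit_relations"))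
--
--     return {
--         "entries_enriched": len(enriched),
--         "total_extracted_xrefs": total_xrefs,
--         "total_implicit_relations": total_implicit_rels,
--         "entries_with_implicit_relations": entries_with_implicit,
--         "total_new_terms": total_new_terms,
--         "total_environments": total_envs,
--     }
-- ===== SOURCE B (Python) =====
-- def enrichment_stats(enriched: list[dict]) -> dict:
--     """Summarize what enrichment found by scanning each entry's items once,
--     dispatching on the key into a dict of counters (no keyed lookups)."""
--     totals = {"implicit_relations": 0, "new_terms": 0,
--               "extracted_xrefs": 0, "extracted_envs": 0}
--     with_impl = 0
--     for e in enriched: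
--         for k, v in e.items():
--             if k in totals:
--                 totals[k] += len(v)
--                 if k == "implicit_relations" and v:
--                     with_impl += 1
--     return {
--         "entries_enriched": len(enriched),
--         "total_extracted_xrefs": totals["extracted_xrefs"],
--         "total_implicit_relations": totals["implicit_relations"],
--         "entries_with_implicit_relations": with_impl,
--         "total_new_terms": totals["new_terms"],
--         "total_environments": totals["extracted_envs"],
--     }
-- ===== Notes on version B (the rewrite author's own statement) =====
-- stated objective: alternative
-- what changed: Instead of A's five keyed scans (four sums of per-field e.get lookups plus a truthiness count), B makes one pass over each entry's items(), dispatching each key-value pair into a dict of counters when the key is one of the four tracked fields; Pre_ only excludes Lean association lists with duplicate keys inside an entry, which represent no Python dict and so never arise at the Python level.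
import Mathlib
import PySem

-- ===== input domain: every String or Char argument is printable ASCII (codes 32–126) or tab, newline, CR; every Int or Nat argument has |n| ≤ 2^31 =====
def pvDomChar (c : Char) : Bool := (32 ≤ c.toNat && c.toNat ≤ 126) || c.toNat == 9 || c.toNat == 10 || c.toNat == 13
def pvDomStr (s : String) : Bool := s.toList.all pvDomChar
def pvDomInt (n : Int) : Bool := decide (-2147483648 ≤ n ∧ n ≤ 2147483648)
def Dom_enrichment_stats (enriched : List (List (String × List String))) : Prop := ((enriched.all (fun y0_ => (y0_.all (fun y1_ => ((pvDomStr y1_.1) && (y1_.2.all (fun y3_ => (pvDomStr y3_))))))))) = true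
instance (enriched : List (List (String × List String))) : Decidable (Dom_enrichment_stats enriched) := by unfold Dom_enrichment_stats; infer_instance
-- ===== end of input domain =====

-- B replaces A's five keyed scans of each entry with one pass over each entry's items dispatching by key into a dict of counters (objective: alternative).


-- ===== PORT A =====
def enrichment_stats (enriched : List (List (String × List String))) : List (String × Int) :=
  let total_implicit_rels : Int :=
    (enriched.map (fun e => ((PySem.Dict.getD (PySem.Dict.mk e) "implicit_relations" []).length : Int))).sum
  let total_new_terms : Int :=
    (enriched.map (fun e => ((PySem.Dict.getD (PySem.Dict.mk e) "new_terms" []).length : Int))).sum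
  let total_xrefs : Int :=
    (enriched.map (fun e => ((PySem.Dict.getD (PySem.Dict.mk e) "extracted_xrefs" []).length : Int))).sum
  let total_envs : Int :=
    (enriched.map (fun e => ((PySem.Dict.getD (PySem.Dict.mk e) "extracted_envs" []).length : Int))).sum
  -- e.get("implicit_relations") with no default: None (falsy) when missing, the list otherwise
  let entries_with_implicit : Int :=
    (enriched.map (fun e =>
      match PySem.Dict.get? (PySem.Dict.mk e) "implicit_relations" with
      | some v => if v = [] then (0 : Int) else 1
      | none => (0 : Int))).sum
  [("entries_enriched", (enriched.length : Int)),
   ("total_extracted_xrefs", total_xrefs),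
   ("total_implicit_relations", total_implicit_rels),
   ("entries_with_implicit_relations", entries_with_implicit),
   ("total_new_terms", total_new_terms),
   ("total_environments", total_envs)]

-- ===== PORT B =====
-- the body of B's inner loop over one (key, value) item of an entry
def pvBStep (s : PySem.Dict String Int × Int) (p : String × List String) : PySem.Dict String Int × Int :=
  if s.1.contains p.1 then
    (s.1.modify p.1 0 (fun x => x + (p.2.length : Int)),
     if p.1 == "implicit_relations" && !p.2.isEmpty then s.2 + 1 else s.2)
  else s

def enrichment_stats_alt (enriched : List (List (String × List String))) : List (String × Int) :=
  let totals0 : PySem.Dict String Int :=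
    ((((PySem.Dict.empty).insert "implicit_relations" (0 : Int)).insert "new_terms" 0).insert
        "extracted_xrefs" 0).insert "extracted_envs" 0
  let res := enriched.foldl (fun s e => e.foldl pvBStep s) (totals0, (0 : Int))
  [("entries_enriched", (enriched.length : Int)),
   ("total_extracted_xrefs", res.1.getD "extracted_xrefs" 0),
   ("total_implicit_relations", res.1.getD "implicit_relations" 0),
   ("entries_with_implicit_relations", res.2),
   ("total_new_terms", res.1.getD "new_terms" 0),
   ("total_environments", res.1.getD "extracted_envs" 0)]

-- ===== PRECONDITION & SPEC =====
-- Pre_ only excludes association lists with duplicate keys inside an entry: such lists represent no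
-- Python dict (the declared input is list[dict]), so every actual Python input satisfies Pre_.
def Pre_enrichment_stats (enriched : List (List (String × List String))) : Prop :=
  ∀ e ∈ enriched, (e.map Prod.fst).Nodup
instance (enriched : List (List (String × List String))) : Decidable (Pre_enrichment_stats enriched) := by unfold Pre_enrichment_stats; infer_instance
def pvWitness_enrichment_stats : (List (List (String × List String))) :=
  [[("implicit_relations", ["x"]), ("new_terms", [])], [("extracted_envs", ["a", "b"])]]

def Spec_enrichment_stats (enriched : List (List (String × List String))) (out : List (String × Int)) : Prop := out = enrichment_stats_alt enriched
instance (enriched : List (List (String × List String))) (out : List (String × Int)) : Decidable (Spec_enrichment_stats enriched out) := by unfold Spec_enrichment_stats; infer_instance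

-- ===== CLAIM (what is proved, stated in full; the proofs are below) =====
def Claim_equal_enrichment_stats : Prop := ∀ (enriched : List (List (String × List String))), Dom_enrichment_stats enriched → Pre_enrichment_stats enriched → Spec_enrichment_stats enriched (enrichment_stats enriched)

-- ===== LEMMAS AND PROOFS =====

-- B's inner loop never adds or removes keys of the counters dict.
lemma pv_contains (l : List (String × List String)) (d : PySem.Dict String Int) (w : Int)
    (k : String) : (l.foldl pvBStep (d, w)).1.contains k = d.contains k := by
  induction l generalizing d w with
  | nil => rfl
  | cons p t ih =>
    simp only [List.foldl_cons, pvBStep]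
    by_cases h : d.contains p.1
    · simp only [h, if_pos]
      rw [ih]
      rw [PySem.Dict.contains_modify]
      by_cases hk : k = p.1
      · subst hk; simp [h]
      · simp [hk]
    · simp [h, ih]

-- the counter at a tracked key f after B's inner loop: old value + lengths of the values listed at f
lemma pv_getD (l : List (String × List String)) (d : PySem.Dict String Int) (w : Int)
    (f : String) (hf : d.contains f = true) :
    (l.foldl pvBStep (d, w)).1.getD f 0 =
      d.getD f 0 + ((l.filter (fun p => p.1 == f)).map (fun p => (p.2.length : Int))).sum := by
  induction l generalizing d w with
  | nil => simp
  | cons p t ih =>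
    simp only [List.foldl_cons, pvBStep, List.filter_cons]
    by_cases h : d.contains p.1
    · simp only [h, if_pos]
      have hf' : (d.modify p.1 0 (fun x => x + (p.2.length : Int))).contains f = true := by
        rw [PySem.Dict.contains_modify]; simp [hf]
      rw [ih _ _ hf']
      rw [PySem.Dict.getD_modify]
      by_cases he : p.1 = f
      · subst he; simp; ring
      · have : ¬ (f = p.1) := fun hh => he hh.symm
        simp [he, this]
    · have hne : (p.1 == f) = false := by
        cases hb : (p.1 == f)
        · rfl
        · have : d.contains p.1 = true := by rw [(beq_iff_eq).mp hb]; exact hf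
          exact absurd this h
      simp [h, hne, ih _ _ hf]

-- B's with_impl counter after the inner loop
lemma pv_cnt (l : List (String × List String)) (d : PySem.Dict String Int) (w : Int)
    (hf : d.contains "implicit_relations" = true) :
    (l.foldl pvBStep (d, w)).2 =
      w + ((l.filter (fun p => p.1 == "implicit_relations" && !p.2.isEmpty)).length : Int) := by
  induction l generalizing d w with
  | nil => simp
  | cons p t ih =>
    simp only [List.foldl_cons, pvBStep, List.filter_cons]
    by_cases h : d.contains p.1
    · simp only [h, if_pos]
      have hf' : (d.modify p.1 0 (fun x => x + (p.2.length : Int))).contains "implicit_relations" = true := by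
        rw [PySem.Dict.contains_modify]; simp [hf]
      rw [ih _ _ hf']
      by_cases hc : (p.1 == "implicit_relations" && !p.2.isEmpty) = true
      · simp [hc]; ring
      · rw [Bool.not_eq_true] at hc
        simp [hc]
    · have hne : (p.1 == "implicit_relations") = false := by
        cases hb : (p.1 == "implicit_relations")
        · rfl
        · have : d.contains p.1 = true := by rw [(beq_iff_eq).mp hb]; exact hf
          exact absurd this h
      simp [h, hne, ih _ _ hf]

-- on a duplicate-free entry, the filtered length-sum is the length of the first-match lookup
lemma pv_entry_sum (e : List (String × List String)) (f : String)
    (hnd : (e.map Prod.fst).Nodup) :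
    ((e.filter (fun p => p.1 == f)).map (fun p => (p.2.length : Int))).sum =
      ((PySem.Dict.getD (PySem.Dict.mk e) f []).length : Int) := by
  induction e with
  | nil => simp [PySem.Dict.getD, PySem.Dict.get?]
  | cons p t ih =>
    obtain ⟨k, v⟩ := p
    simp only [List.map_cons, List.nodup_cons] at hnd
    obtain ⟨hp, ht⟩ := hnd
    simp only [List.filter_cons]
    have hget : PySem.Dict.getD (PySem.Dict.mk ((k, v) :: t)) f [] =
        if k == f then v else PySem.Dict.getD (PySem.Dict.mk t) f [] := by
      simp only [PySem.Dict.getD, PySem.Dict.get?_mk_cons]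
      by_cases hc : (k == f) = true <;> simp [hc]
    by_cases hc : (k == f) = true
    · have hk : k = f := (beq_iff_eq).mp hc
      have hfilt : t.filter (fun q => q.1 == f) = [] := by
        apply List.filter_eq_nil_iff.mpr
        intro q hq hqf
        exact hp (List.mem_map.mpr ⟨q, hq, ((beq_iff_eq).mp hqf).trans hk.symm⟩)
      simp [hc, hget, hfilt]
    · simp [hc, hget, ih ht]

-- on a duplicate-free entry, the filtered count is A's truthiness indicator
lemma pv_entry_cnt (e : List (String × List String))
    (hnd : (e.map Prod.fst).Nodup) :
    ((e.filter (fun p => p.1 == "implicit_relations" && !p.2.isEmpty)).length : Int) =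
      (match PySem.Dict.get? (PySem.Dict.mk e) "implicit_relations" with
       | some v => if v = [] then (0 : Int) else 1
       | none => (0 : Int)) := by
  induction e with
  | nil => simp [PySem.Dict.get?]
  | cons p t ih =>
    obtain ⟨k, v⟩ := p
    simp only [List.map_cons, List.nodup_cons] at hnd
    obtain ⟨hp, ht⟩ := hnd
    simp only [List.filter_cons, PySem.Dict.get?_mk_cons]
    by_cases hc : (k == "implicit_relations") = true
    · have hk : k = "implicit_relations" := (beq_iff_eq).mp hc
      have hfilt : t.filter (fun q => q.1 == "implicit_relations" && !q.2.isEmpty) = [] := by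
        apply List.filter_eq_nil_iff.mpr
        intro q hq hqf
        have hq1 : (q.1 == "implicit_relations") = true := by
          cases hb : (q.1 == "implicit_relations") <;> simp [hb] at hqf ⊢
        exact hp (List.mem_map.mpr ⟨q, hq, ((beq_iff_eq).mp hq1).trans hk.symm⟩)
      by_cases hv : v.isEmpty = true
      · have hvnil : v = [] := by cases v <;> simp_all
        simp [hc, hfilt, hvnil]
      · have hvnil : ¬ (v = []) := by cases v <;> simp_all
        simp [hc, hv, hfilt, hvnil]
    · have hcf : (k == "implicit_relations") = false := by simpa using hc
      simp only [hcf, Bool.false_and, Bool.false_eq_true, if_false]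
      simp [ih ht]

-- outer loop, counters component
lemma pv_outer_getD (L : List (List (String × List String)))
    (hL : ∀ e ∈ L, (e.map Prod.fst).Nodup)
    (d : PySem.Dict String Int) (w : Int) (f : String) (hf : d.contains f = true) :
    (L.foldl (fun s e => e.foldl pvBStep s) (d, w)).1.getD f 0 =
      d.getD f 0 + (L.map (fun e => ((PySem.Dict.getD (PySem.Dict.mk e) f []).length : Int))).sum := by
  induction L generalizing d w with
  | nil => simp
  | cons e t ih =>
    simp only [List.foldl_cons, List.map_cons, List.sum_cons]
    have hnd := hL e (List.mem_cons_self ..)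
    have ht : ∀ x ∈ t, (x.map Prod.fst).Nodup := fun x hx => hL x (List.mem_cons_of_mem _ hx)
    have hpair : e.foldl pvBStep (d, w) = ((e.foldl pvBStep (d, w)).1, (e.foldl pvBStep (d, w)).2) := rfl
    rw [hpair, ih ht _ _ (by rw [pv_contains]; exact hf)]
    rw [pv_getD _ _ _ _ hf, pv_entry_sum e f hnd]
    ring

-- outer loop, with_impl component
lemma pv_outer_cnt (L : List (List (String × List String)))
    (hL : ∀ e ∈ L, (e.map Prod.fst).Nodup)
    (d : PySem.Dict String Int) (w : Int) (hf : d.contains "implicit_relations" = true) :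
    (L.foldl (fun s e => e.foldl pvBStep s) (d, w)).2 =
      w + (L.map (fun e =>
        match PySem.Dict.get? (PySem.Dict.mk e) "implicit_relations" with
        | some v => if v = [] then (0 : Int) else 1
        | none => (0 : Int))).sum := by
  induction L generalizing d w with
  | nil => simp
  | cons e t ih =>
    simp only [List.foldl_cons, List.map_cons, List.sum_cons]
    have hnd := hL e (List.mem_cons_self ..)
    have ht : ∀ x ∈ t, (x.map Prod.fst).Nodup := fun x hx => hL x (List.mem_cons_of_mem _ hx)
    have hpair : e.foldl pvBStep (d, w) = ((e.foldl pvBStep (d, w)).1, (e.foldl pvBStep (d, w)).2) := rfl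
    rw [hpair, ih ht _ _ (by rw [pv_contains]; exact hf)]
    rw [pv_cnt _ _ _ hf, pv_entry_cnt e hnd]
    ring

-- ===== VERDICT (by name: the statement is the Claim_ definition above) =====
theorem enrichment_stats_spec : Claim_equal_enrichment_stats := by
  intro enriched _ hpre
  show enrichment_stats enriched = enrichment_stats_alt enriched
  simp only [enrichment_stats, enrichment_stats_alt]
  have c1 : (((((PySem.Dict.empty : PySem.Dict String Int).insert "implicit_relations" 0).insert "new_terms" 0).insert "extracted_xrefs" 0).insert "extracted_envs" 0).contains "implicit_relations" = true := by decide
  have c2 : (((((PySem.Dict.empty : PySem.Dict String Int).insert "implicit_relations" 0).insert "new_terms" 0).insert "extracted_xrefs" 0).insert "extracted_envs" 0).contains "new_terms" = true := by decide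
  have c3 : (((((PySem.Dict.empty : PySem.Dict String Int).insert "implicit_relations" 0).insert "new_terms" 0).insert "extracted_xrefs" 0).insert "extracted_envs" 0).contains "extracted_xrefs" = true := by decide
  have c4 : (((((PySem.Dict.empty : PySem.Dict String Int).insert "implicit_relations" 0).insert "new_terms" 0).insert "extracted_xrefs" 0).insert "extracted_envs" 0).contains "extracted_envs" = true := by decide
  rw [pv_outer_getD enriched hpre _ _ _ c1, pv_outer_getD enriched hpre _ _ _ c2,
      pv_outer_getD enriched hpre _ _ _ c3, pv_outer_getD enriched hpre _ _ _ c4,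
      pv_outer_cnt enriched hpre _ _ c1]
  norm_num
  and_intros <;> decide
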